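-- pv_equiv track=rewrite | github.com/projectbase-5/remix-of-ids2 | docs/incident_scoring_engine.py | detect_kill_chain_sequence
-- ===== SOURCE A (Python) =====
-- from typing import Dict, List, Optional, Any
--
-- KILL_CHAIN_ORDER = [
--     "reconnaissance",
--     "delivery",
--     "exploitation",
--     "installation",
--     "command_control",
--     "exfiltration",
-- ]
--
-- ATTACK_TO_PHASE = {
--     "Port Scan": "reconnaissance",
--     "Network Scan": "reconnaissance",
--     "Reconnaissance": "reconnaissance",
--     "Brute Force": "exploitation",
--     "SQL Injection": "exploitation",
--     "XSS": "exploitation",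
--     "Exploit": "exploitation",
--     "DoS": "delivery",
--     "DDoS": "delivery",
--     "Malware": "installation",
--     "Trojan": "installation",
--     "Ransomware": "installation",
--     "C2 Communication": "command_control",
--     "Beacon": "command_control",
--     "DNS Anomaly": "command_control",
--     "Data Exfiltration": "exfiltration",
--     "Data Leak": "exfiltration",
-- }
--
-- def detect_kill_chain_sequence(attack_types: List[str]) -> tuple:
--     """Detect if attack types form a kill chain sequence (3+ consecutive phases)."""
--     phases = list(set(
--         ATTACK_TO_PHASE[t] for t in attack_types if t in ATTACK_TO_PHASE
--     ))
--     indices = sorted(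
--         KILL_CHAIN_ORDER.index(p) for p in phases if p in KILL_CHAIN_ORDER
--     )
--
--     if len(indices) < 3:
--         return False, None
--
--     max_run = 1
--     current_run = 1
--     best_start = 0
--
--     for i in range(1, len(indices)):
--         if indices[i] - indices[i - 1] <= 1:
--             current_run += 1
--             if current_run > max_run:
--                 max_run = current_run
--                 best_start = i - current_run + 1
--         else:
--             current_run = 1
--
--     if max_run >= 3:
--         seq = [KILL_CHAIN_ORDER[indices[best_start + j]] for j in range(max_run)]
--         return True, " → ".join(seq)
--
--     return False, None
-- ===== SOURCE B (Python) =====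
-- KILL_CHAIN_ORDER = [
--     "reconnaissance",
--     "delivery",
--     "exploitation",
--     "installation",
--     "command_control",
--     "exfiltration",
-- ]
--
-- ATTACK_TO_PHASE = {
--     "Port Scan": "reconnaissance",
--     "Network Scan": "reconnaissance",
--     "Reconnaissance": "reconnaissance",
--     "Brute Force": "exploitation",
--     "SQL Injection": "exploitation",
--     "XSS": "exploitation",
--     "Exploit": "exploitation",
--     "DoS": "delivery",
--     "DDoS": "delivery",
--     "Malware": "installation",
--     "Trojan": "installation",
--     "Ransomware": "installation",
--     "C2 Communication": "command_control",
--     "Beacon": "command_control",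
--     "DNS Anomaly": "command_control",
--     "Data Exfiltration": "exfiltration",
--     "Data Leak": "exfiltration",
-- }
--
-- def detect_kill_chain_sequence(attack_types):
--     """Detect if attack types form a kill chain sequence (3+ consecutive phases)."""
--     phases = {ATTACK_TO_PHASE[t] for t in attack_types if t in ATTACK_TO_PHASE}
--     best_len = 0
--     best_start = 0
--     run_len = 0
--     for i, phase in enumerate(KILL_CHAIN_ORDER):
--         if phase in phases:
--             run_len += 1
--             if run_len > best_len:
--                 best_len = run_len
--                 best_start = i - run_len + 1
--         else:
--             run_len = 0
--     if best_len >= 3: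
--         return True, " → ".join(KILL_CHAIN_ORDER[best_start:best_start + best_len])
--     return False, None
-- ===== Notes on version B (the rewrite author's own statement) =====
-- stated objective: simpler
-- what changed: B drops A's sort-the-mapped-phase-indices-then-scan-gaps pass: it walks the fixed six-phase KILL_CHAIN_ORDER once with a set-membership test, tracking the current and best consecutive-presence run directly.
import Mathlib
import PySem

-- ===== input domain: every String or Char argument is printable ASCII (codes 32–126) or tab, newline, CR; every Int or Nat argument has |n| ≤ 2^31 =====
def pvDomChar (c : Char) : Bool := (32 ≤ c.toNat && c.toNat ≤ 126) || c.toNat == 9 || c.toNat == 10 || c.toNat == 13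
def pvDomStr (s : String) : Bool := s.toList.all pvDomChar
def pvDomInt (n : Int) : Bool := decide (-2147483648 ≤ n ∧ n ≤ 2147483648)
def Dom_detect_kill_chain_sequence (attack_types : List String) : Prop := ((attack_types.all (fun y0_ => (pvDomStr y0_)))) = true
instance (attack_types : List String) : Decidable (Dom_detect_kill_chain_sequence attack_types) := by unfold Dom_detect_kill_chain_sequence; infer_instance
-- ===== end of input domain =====

-- B replaces A's sort-the-phase-indices-and-scan-gaps pass by a single walk over the fixed
-- KILL_CHAIN_ORDER with a membership test (simpler; same cost on the constant-size chain).


-- shared module constants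
def pvOrder : List String :=
  ["reconnaissance", "delivery", "exploitation", "installation", "command_control", "exfiltration"]

def pvAttackToPhase : PySem.Dict String String := PySem.Dict.ofList
  [("Port Scan", "reconnaissance"), ("Network Scan", "reconnaissance"),
   ("Reconnaissance", "reconnaissance"), ("Brute Force", "exploitation"),
   ("SQL Injection", "exploitation"), ("XSS", "exploitation"), ("Exploit", "exploitation"),
   ("DoS", "delivery"), ("DDoS", "delivery"), ("Malware", "installation"),
   ("Trojan", "installation"), ("Ransomware", "installation"),
   ("C2 Communication", "command_control"), ("Beacon", "command_control"),
   ("DNS Anomaly", "command_control"), ("Data Exfiltration", "exfiltration"),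
   ("Data Leak", "exfiltration")]

-- ===== PORT A =====
-- `list(set(...))`: the set is PySem.Set.ofList; CPython's set order is unspecified, but A
-- immediately sorts the mapped indices, so the result does not depend on that order.
-- `ATTACK_TO_PHASE[t]` is guarded by `t in ATTACK_TO_PHASE`, so getD never meets its default;
-- likewise `KILL_CHAIN_ORDER.index(p)` is guarded by `p in KILL_CHAIN_ORDER` and the final
-- indexing is in range, so the pyGetD defaults are never produced.
def detect_kill_chain_sequence (attack_types : List String) : Bool × Option String :=
  let phases : List String :=
    PySem.Set.ofList ((attack_types.filter (fun t => pvAttackToPhase.contains t)).map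
      (fun t => pvAttackToPhase.getD t ""))
  let indices : List Int :=
    PySem.List.sorted ((phases.filter (fun p => pvOrder.contains p)).map
      (fun p => (((PySem.List.index? pvOrder p).getD 0 : Nat) : Int))) (fun x => x) false
  if indices.length < 3 then (false, none)
  else
    let st := (PySem.List.pyRange 1 (indices.length : Int) 1).foldl
      (fun (s : Int × Int × Int) i =>
        if PySem.List.pyGetD indices i 0 - PySem.List.pyGetD indices (i - 1) 0 ≤ 1 then
          let current_run := s.2.1 + 1
          if current_run > s.1 then (current_run, current_run, i - current_run + 1)
          else (s.1, current_run, s.2.2)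
        else (s.1, 1, s.2.2))
      (1, 1, 0)
    if st.1 ≥ 3 then
      let seq := (PySem.List.pyRange 0 st.1 1).map
        (fun j => PySem.List.pyGetD pvOrder (PySem.List.pyGetD indices (st.2.2 + j) 0) "")
      (true, some (PySem.Str.join " → " seq))
    else (false, none)

-- ===== PORT B =====
def detect_kill_chain_sequence_alt (attack_types : List String) : Bool × Option String :=
  let phases : List String :=
    PySem.Set.ofList ((attack_types.filter (fun t => pvAttackToPhase.contains t)).map
      (fun t => pvAttackToPhase.getD t ""))
  let st := (PySem.List.enumerate pvOrder 0).foldl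
    (fun (s : Int × Int × Int) ip =>
      if PySem.Set.contains phases ip.2 then
        let run_len := s.2.2 + 1
        if run_len > s.1 then (run_len, ip.1 - run_len + 1, run_len)
        else (s.1, s.2.1, run_len)
      else (s.1, s.2.1, 0))
    (0, 0, 0)
  if st.1 ≥ 3 then
    (true, some (PySem.Str.join " → "
      (PySem.List.slice pvOrder (some st.2.1) (some (st.2.1 + st.1)))))
  else (false, none)

-- ===== PRECONDITION & SPEC =====
def Spec_detect_kill_chain_sequence (attack_types : List String) (out : Bool × Option String) : Prop := out = detect_kill_chain_sequence_alt attack_types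
instance (attack_types : List String) (out : Bool × Option String) : Decidable (Spec_detect_kill_chain_sequence attack_types out) := by unfold Spec_detect_kill_chain_sequence; infer_instance

-- ===== CLAIM (what is proved, stated in full; the proofs are below) =====
def Claim_equal_detect_kill_chain_sequence : Prop := ∀ (attack_types : List String), Dom_detect_kill_chain_sequence attack_types → Spec_detect_kill_chain_sequence attack_types (detect_kill_chain_sequence attack_types)

-- ===== LEMMAS AND PROOFS =====

-- the sorted index list, as a function of which of the six phases are present
def idxF (b0 b1 b2 b3 b4 b5 : Bool) : List Int :=
  (if b0 then [0] else []) ++ (if b1 then [1] else []) ++ (if b2 then [2] else []) ++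
  (if b3 then [3] else []) ++ (if b4 then [4] else []) ++ (if b5 then [(5 : Int)] else [])

theorem idxF_nodup (b0 b1 b2 b3 b4 b5 : Bool) : (idxF b0 b1 b2 b3 b4 b5).Nodup := by
  revert b0 b1 b2 b3 b4 b5; decide

theorem idxF_pairwise (b0 b1 b2 b3 b4 b5 : Bool) :
    (idxF b0 b1 b2 b3 b4 b5).Pairwise (fun a b => (fun x : Int => x) a < (fun x : Int => x) b) := by
  revert b0 b1 b2 b3 b4 b5; decide

theorem mem_idxF (j : Int) (b0 b1 b2 b3 b4 b5 : Bool) :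
    j ∈ idxF b0 b1 b2 b3 b4 b5 ↔
      (b0 = true ∧ j = 0) ∨ (b1 = true ∧ j = 1) ∨ (b2 = true ∧ j = 2) ∨
      (b3 = true ∧ j = 3) ∨ (b4 = true ∧ j = 4) ∨ (b5 = true ∧ j = 5) := by
  cases b0 <;> cases b1 <;> cases b2 <;> cases b3 <;> cases b4 <;> cases b5 <;> simp [idxF]

theorem indices_eq (P : List String) (hnd : P.Nodup) :
    PySem.List.sorted ((P.filter (fun p => pvOrder.contains p)).map
        (fun p => (((PySem.List.index? pvOrder p).getD 0 : Nat) : Int))) (fun x => x) false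
      = idxF (PySem.Set.contains P "reconnaissance") (PySem.Set.contains P "delivery")
          (PySem.Set.contains P "exploitation") (PySem.Set.contains P "installation")
          (PySem.Set.contains P "command_control") (PySem.Set.contains P "exfiltration") := by
  apply PySem.List.sorted_eq_of_perm_of_pairwise_lt
  · rw [List.perm_ext_iff_of_nodup]
    · intro j
      rw [mem_idxF]
      simp only [List.mem_map, List.mem_filter]
      constructor
      · rintro ((⟨hb, rfl⟩ | ⟨hb, rfl⟩ | ⟨hb, rfl⟩ | ⟨hb, rfl⟩ | ⟨hb, rfl⟩ | ⟨hb, rfl⟩)) <;>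
          [exact ⟨"reconnaissance", ⟨(PySem.Set.contains_iff _ _).mp hb, by decide⟩, by decide⟩;
           exact ⟨"delivery", ⟨(PySem.Set.contains_iff _ _).mp hb, by decide⟩, by decide⟩;
           exact ⟨"exploitation", ⟨(PySem.Set.contains_iff _ _).mp hb, by decide⟩, by decide⟩;
           exact ⟨"installation", ⟨(PySem.Set.contains_iff _ _).mp hb, by decide⟩, by decide⟩;
           exact ⟨"command_control", ⟨(PySem.Set.contains_iff _ _).mp hb, by decide⟩, by decide⟩;
           exact ⟨"exfiltration", ⟨(PySem.Set.contains_iff _ _).mp hb, by decide⟩, by decide⟩]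
      · rintro ⟨p, ⟨hpP, hpc⟩, rfl⟩
        have hpo : p ∈ pvOrder := by simpa using hpc
        simp only [pvOrder, List.mem_cons, List.not_mem_nil, or_false] at hpo
        rcases hpo with rfl | rfl | rfl | rfl | rfl | rfl
        · exact Or.inl ⟨(PySem.Set.contains_iff _ _).mpr hpP, by decide⟩
        · exact Or.inr (Or.inl ⟨(PySem.Set.contains_iff _ _).mpr hpP, by decide⟩)
        · exact Or.inr (Or.inr (Or.inl ⟨(PySem.Set.contains_iff _ _).mpr hpP, by decide⟩))
        · exact Or.inr (Or.inr (Or.inr (Or.inl ⟨(PySem.Set.contains_iff _ _).mpr hpP, by decide⟩)))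
        · exact Or.inr (Or.inr (Or.inr (Or.inr (Or.inl ⟨(PySem.Set.contains_iff _ _).mpr hpP, by decide⟩))))
        · exact Or.inr (Or.inr (Or.inr (Or.inr (Or.inr ⟨(PySem.Set.contains_iff _ _).mpr hpP, by decide⟩))))
    · exact idxF_nodup _ _ _ _ _ _
    · apply List.Nodup.map_on
      · intro x hx y hy hxy
        have hxo : x ∈ pvOrder := by simpa using (List.mem_filter.mp hx).2
        have hyo : y ∈ pvOrder := by simpa using (List.mem_filter.mp hy).2
        simp only [pvOrder, List.mem_cons, List.not_mem_nil, or_false] at hxo hyo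
        rcases hxo with rfl | rfl | rfl | rfl | rfl | rfl <;>
          rcases hyo with rfl | rfl | rfl | rfl | rfl | rfl <;> first | rfl | (exfalso; revert hxy; decide)
      · exact hnd.filter _
  · exact idxF_pairwise _ _ _ _ _ _


-- named forms of the two tail computations (definitionally equal to the ports' bodies)
def tailA (indices : List Int) : Bool × Option String :=
  if indices.length < 3 then (false, none)
  else
    let st := (PySem.List.pyRange 1 (indices.length : Int) 1).foldl
      (fun (s : Int × Int × Int) i =>
        if PySem.List.pyGetD indices i 0 - PySem.List.pyGetD indices (i - 1) 0 ≤ 1 then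
          let current_run := s.2.1 + 1
          if current_run > s.1 then (current_run, current_run, i - current_run + 1)
          else (s.1, current_run, s.2.2)
        else (s.1, 1, s.2.2))
      (1, 1, 0)
    if st.1 ≥ 3 then
      (true, some (PySem.Str.join " → " ((PySem.List.pyRange 0 st.1 1).map
        (fun j => PySem.List.pyGetD pvOrder (PySem.List.pyGetD indices (st.2.2 + j) 0) ""))))
    else (false, none)

def stepB (m : String → Bool) (s : Int × Int × Int) (ip : Int × String) : Int × Int × Int :=
  if m ip.2 then
    let run_len := s.2.2 + 1
    if run_len > s.1 then (run_len, ip.1 - run_len + 1, run_len)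
    else (s.1, s.2.1, run_len)
  else (s.1, s.2.1, 0)

def tailB (st : Int × Int × Int) : Bool × Option String :=
  if st.1 ≥ 3 then
    (true, some (PySem.Str.join " → "
      (PySem.List.slice pvOrder (some st.2.1) (some (st.2.1 + st.1)))))
  else (false, none)

-- B's loop over the fixed six-phase chain, with the six membership bits made explicit
def gstep (i : Int) (b : Bool) (s : Int × Int × Int) : Int × Int × Int :=
  if b then
    let run_len := s.2.2 + 1
    if run_len > s.1 then (run_len, i - run_len + 1, run_len)
    else (s.1, s.2.1, run_len)
  else (s.1, s.2.1, 0)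

def gB (b0 b1 b2 b3 b4 b5 : Bool) : Int × Int × Int :=
  gstep 5 b5 (gstep 4 b4 (gstep 3 b3 (gstep 2 b2 (gstep 1 b1 (gstep 0 b0 (0, 0, 0))))))

theorem foldB (m : String → Bool) :
    (PySem.List.enumerate pvOrder 0).foldl (stepB m) (0, 0, 0)
      = gB (m "reconnaissance") (m "delivery") (m "exploitation") (m "installation")
          (m "command_control") (m "exfiltration") := rfl

-- the two tail computations agree for every presence pattern of the six phases
set_option maxHeartbeats 2000000 in
theorem key64 (b0 b1 b2 b3 b4 b5 : Bool) :
    tailA (idxF b0 b1 b2 b3 b4 b5) = tailB (gB b0 b1 b2 b3 b4 b5) := by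
  revert b0 b1 b2 b3 b4 b5
  decide

-- ===== VERDICT (by name: the statement is the Claim_ definition above) =====
theorem detect_kill_chain_sequence_spec : Claim_equal_detect_kill_chain_sequence := by
  intro ats _
  unfold Spec_detect_kill_chain_sequence detect_kill_chain_sequence detect_kill_chain_sequence_alt
  dsimp only []
  generalize hP : PySem.Set.ofList ((ats.filter (fun t => pvAttackToPhase.contains t)).map
      (fun t => pvAttackToPhase.getD t "")) = P
  have hnd : P.Nodup := by rw [← hP]; exact PySem.Set.nodup_ofList _
  rw [indices_eq P hnd]
  show tailA (idxF (PySem.Set.contains P "reconnaissance") (PySem.Set.contains P "delivery")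
      (PySem.Set.contains P "exploitation") (PySem.Set.contains P "installation")
      (PySem.Set.contains P "command_control") (PySem.Set.contains P "exfiltration"))
    = tailB ((PySem.List.enumerate pvOrder 0).foldl (stepB (fun s => PySem.Set.contains P s)) (0, 0, 0))
  rw [foldB]
  exact key64 _ _ _ _ _ _
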